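-- pv_equiv track=rewrite | github.com/josephgiroux/machinelearning | question_answer/kaggle_vers.py | sep_digits
-- ===== SOURCE A (Python) =====
-- def sep_digits(word):
--     """
--     occasionally after swapping out numerals for '#', we may end up with a word that
--     is mixed letters and ##s.  break out the alphabetic part and the numeric part and
--     return the pieces in the order we foudn them
--     """
--     first = ""
--     second = ""
--     dig_first = None
--     for n, ch in enumerate(word):
--         if not n:
--             dig_first = ch == '#'
--
--         if ch == '#':
--             if dig_first:
--                 first += ch
--             else:
--                 second += ch
--         else:
--             if dig_first:
--                 second += ch
--             else:
--                 first += ch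
--
--     return first, second
-- ===== SOURCE B (Python) =====
-- def sep_digits(word):
--     """Split word into its '#' part and its non-'#' part, ordered by which
--     kind the word starts with."""
--     if not word:
--         return "", ""
--     hashes = ''.join(c for c in word if c == '#')
--     letters = ''.join(c for c in word if c != '#')
--     if word[0] == '#':
--         return hashes, letters
--     return letters, hashes
-- ===== Notes on version B (the rewrite author's own statement) =====
-- stated objective: simpler
-- what changed: Replaces the stateful interleaved routing loop (tracking dig_first and appending to one of two accumulators per character) with two whole-word filters plus a single order decision based on the first character.
import Mathlib
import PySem

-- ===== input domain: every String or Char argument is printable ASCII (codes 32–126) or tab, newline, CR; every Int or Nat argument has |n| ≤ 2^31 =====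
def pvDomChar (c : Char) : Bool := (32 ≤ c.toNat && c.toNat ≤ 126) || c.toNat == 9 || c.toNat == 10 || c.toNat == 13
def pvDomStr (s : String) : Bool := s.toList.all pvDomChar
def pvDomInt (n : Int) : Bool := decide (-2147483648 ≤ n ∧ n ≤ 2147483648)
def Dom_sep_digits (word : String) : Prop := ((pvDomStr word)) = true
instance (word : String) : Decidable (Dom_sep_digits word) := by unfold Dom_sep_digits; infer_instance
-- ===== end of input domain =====

-- B replaces A's stateful interleaved routing loop with two whole-word filters
-- plus one order decision on the first character (objective: simpler).

-- ===== PORT A =====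
-- one loop iteration: (first, second, dig_first) updated by (n, ch)
def sepDigitsStep (st : String × String × Option Bool) (p : Int × Char) : String × String × Option Bool :=
  let first := st.1
  let second := st.2.1
  let dig0 := st.2.2
  let n := p.1
  let ch := p.2
  let dig_first := if n == 0 then some (ch == '#') else dig0
  if ch == '#' then
    if dig_first = some true then (first.push ch, second, dig_first)
    else (first, second.push ch, dig_first)
  else
    if dig_first = some true then (first, second.push ch, dig_first)
    else (first.push ch, second, dig_first)

def sep_digits (word : String) : String × String :=
  let st := (PySem.List.enumerate word.toList 0).foldl sepDigitsStep ("", "", none)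
  (st.1, st.2.1)

-- ===== PORT B =====
def sep_digits_alt (word : String) : String × String :=
  match word.toList with
  | [] => ("", "")
  | c :: _ =>
    let hashes := String.ofList (word.toList.filter (fun x => x == '#'))
    let letters := String.ofList (word.toList.filter (fun x => x != '#'))
    if c == '#' then (hashes, letters) else (letters, hashes)

-- ===== PRECONDITION & SPEC =====
def Spec_sep_digits (word : String) (out : String × String) : Prop := out = sep_digits_alt word
instance (word : String) (out : String × String) : Decidable (Spec_sep_digits word out) := by unfold Spec_sep_digits; infer_instance

-- ===== CLAIM (what is proved, stated in full; the proofs are below) =====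
def Claim_equal_sep_digits : Prop := ∀ (word : String), Dom_sep_digits word → Spec_sep_digits word (sep_digits word)

-- ===== LEMMAS AND PROOFS =====

-- After the first iteration dig_first is fixed at `some b`; the rest of the loop
-- appends to `first` exactly the chars whose '#'-ness equals b, to `second` the others.
theorem sepDigits_loop (l : List Char) (b : Bool) (f s : String) (start : Int)
    (hstart : 1 ≤ start) :
    (PySem.List.enumerate l start).foldl sepDigitsStep (f, s, some b) =
      (f ++ String.ofList (l.filter (fun c => (c == '#') == b)),
       s ++ String.ofList (l.filter (fun c => (c == '#') != b)), some b) := by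
  induction l generalizing f s start with
  | nil => simp [PySem.List.enumerate_nil]
  | cons c rest ih =>
    have hne : (start == 0) = false := by
      simp only [beq_eq_false_iff_ne]; omega
    rw [PySem.List.enumerate_cons, List.foldl_cons]
    have h1 : (1 : Int) ≤ start + 1 := by omega
    cases hcb : (c == '#') <;> cases b <;>
      simp [sepDigitsStep, hne, hcb, ih _ _ _ h1, ← String.toList_inj,
        String.toList_push]

theorem sep_digits_eq_alt (word : String) : sep_digits word = sep_digits_alt word := by
  unfold sep_digits sep_digits_alt
  cases h : word.toList with
  | nil => simp [PySem.List.enumerate_nil]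
  | cons c rest =>
    rw [PySem.List.enumerate_cons, List.foldl_cons]
    cases hc : (c == '#') <;>
      simp [sepDigitsStep, hc, sepDigits_loop rest _ _ _ 1 (by omega),
        ← String.toList_inj, String.toList_push] <;>
    · simp [hc, bne]

-- ===== VERDICT (by name: the statement is the Claim_ definition above) =====
theorem sep_digits_spec : Claim_equal_sep_digits := by
  intro word _
  exact sep_digits_eq_alt word
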